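-- pv_equiv track=rewrite | github.com/knitty-kim/ProgrammersSolvingCode | 프로그래머스/1/1845. 폰켓몬/폰켓몬.py | solution
-- ===== SOURCE A (Python) =====
-- import copy
--
-- def solution(nums):
--     set1 = set()
--     max_num = len(nums) // 2
--     answer = 0
--
--     for num in nums:
--         set1.add(num)
--
--     temp_set = copy.deepcopy(set1)
--
--     for pokemon in temp_set:
--         if answer == max_num:
--             break
--         set1.remove(pokemon)
--         answer += 1
--
--     return answer
-- ===== SOURCE B (Python) =====
-- def solution(nums):
--     s = sorted(nums)
--     distinct = 0
--     for i in range(len(s)):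
--         if i == 0 or s[i] != s[i - 1]:
--             distinct += 1
--     return min(distinct, len(nums) // 2)
-- ===== Notes on version B (the rewrite author's own statement) =====
-- stated objective: alternative
-- what changed: B counts distinct values by sorting and scanning adjacent-run boundaries instead of building a set and draining it element by element, then caps at len//2 with min.
import Mathlib
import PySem

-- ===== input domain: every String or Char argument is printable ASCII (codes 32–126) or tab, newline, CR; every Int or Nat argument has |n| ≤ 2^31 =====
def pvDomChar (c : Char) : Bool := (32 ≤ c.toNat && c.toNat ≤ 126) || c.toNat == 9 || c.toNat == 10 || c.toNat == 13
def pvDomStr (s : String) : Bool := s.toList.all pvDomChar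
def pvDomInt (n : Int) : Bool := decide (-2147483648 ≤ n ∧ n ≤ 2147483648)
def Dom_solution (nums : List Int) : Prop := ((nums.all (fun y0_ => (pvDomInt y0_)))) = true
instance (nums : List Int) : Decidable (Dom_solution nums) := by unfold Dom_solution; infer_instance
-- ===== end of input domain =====

-- B counts distinct values by a sort + adjacent-difference scan instead of A's set build-and-drain loop (objective: alternative).

-- ===== PORT A =====
-- the second loop of A: drain temp_set, counting until answer == max_num
-- (set1.remove never raises here since temp_set's elements are in set1; remove?.getD keeps that step total)
def solutionDrain (tempSet : List Int) (set1 : PySem.Set Int) (answer maxNum : Int) : Int :=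
  match tempSet with
  | [] => answer
  | pokemon :: rest =>
      if answer == maxNum then answer
      else solutionDrain rest ((PySem.Set.remove? set1 pokemon).getD set1) (answer + 1) maxNum

def solution (nums : List Int) : Int :=
  let maxNum : Int := PySem.Int.floordiv (nums.length : Int) 2
  let set1 : PySem.Set Int := nums.foldl PySem.Set.add PySem.Set.empty
  let tempSet := set1
  solutionDrain tempSet set1 0 maxNum

-- ===== PORT B =====
-- the scan "count i where i == 0 or s[i] != s[i-1]": first element counts, a later one counts iff it differs from its predecessor
def countRunsFrom (prev : Int) : List Int → Int
  | [] => 0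
  | y :: ys => (if y ≠ prev then 1 else 0) + countRunsFrom y ys

def countRuns : List Int → Int
  | [] => 0
  | x :: xs => 1 + countRunsFrom x xs

def solution_alt (nums : List Int) : Int :=
  let s := PySem.List.sorted nums (fun x => x) false
  min (countRuns s) (PySem.Int.floordiv (nums.length : Int) 2)

-- ===== PRECONDITION & SPEC =====
def Spec_solution (nums : List Int) (out : Int) : Prop := out = solution_alt nums
instance (nums : List Int) (out : Int) : Decidable (Spec_solution nums out) := by unfold Spec_solution; infer_instance

-- ===== CLAIM (what is proved, stated in full; the proofs are below) =====
def Claim_equal_solution : Prop := ∀ (nums : List Int), Dom_solution nums → Spec_solution nums (solution nums)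

-- ===== LEMMAS AND PROOFS =====

-- A's drain loop counts min(a + |l|, m) when it starts with a ≤ m
theorem solutionDrain_eq (l : List Int) : ∀ (s : PySem.Set Int) (a m : Int), a ≤ m →
    solutionDrain l s a m = min (a + l.length) m := by
  induction l with
  | nil => intro s a m h; simp [solutionDrain]; omega
  | cons x xs ih =>
      intro s a m h
      simp only [solutionDrain]
      by_cases hx : a = m
      · simp [hx]; omega
      · simp only [hx, beq_iff_eq, if_false]
        rw [ih _ (a + 1) m (by omega)]
        simp; omega

-- B's scan over a sorted tail: distinct count of prev :: l, minus the one for prev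
theorem countRunsFrom_eq (l : List Int) : ∀ prev : Int, l.Pairwise (· ≤ ·) →
    (∀ y ∈ l, prev ≤ y) → countRunsFrom prev l = ((prev :: l).dedup.length : Int) - 1 := by
  induction l with
  | nil => intro prev _ _; simp [countRunsFrom]
  | cons y ys ih =>
      intro prev hp hle
      have hpy : prev ≤ y := hle y (by simp)
      have hys : ys.Pairwise (· ≤ ·) := hp.of_cons
      have hall : ∀ z ∈ ys, y ≤ z := (List.pairwise_cons.mp hp).1
      by_cases hy : y = prev
      · subst hy
        have hd : (y :: y :: ys).dedup = (y :: ys).dedup := List.dedup_cons_of_mem (by simp)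
        rw [countRunsFrom, if_neg (by simp), hd, ih y hys hall]
        omega
      · have hlt : prev < y := lt_of_le_of_ne hpy (Ne.symm hy)
        have hnm : prev ∉ y :: ys := by
          intro hmem
          rcases List.mem_cons.mp hmem with h | h
          · exact hy h.symm
          · exact absurd (hall _ h) (by omega)
        have hd : (prev :: y :: ys).dedup = prev :: (y :: ys).dedup := List.dedup_cons_of_notMem hnm
        rw [countRunsFrom, if_pos hy, hd, ih y hys hall]
        simp only [List.length_cons]
        push_cast
        omega

theorem countRuns_eq (l : List Int) (h : l.Pairwise (· ≤ ·)) :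
    countRuns l = (l.dedup.length : Int) := by
  cases l with
  | nil => simp [countRuns]
  | cons x xs =>
      rw [countRuns, countRunsFrom_eq xs x h.of_cons (List.pairwise_cons.mp h).1]
      have : 1 ≤ (x :: xs).dedup.length := by
        have : (x :: xs).dedup ≠ [] := by simp [List.dedup_eq_nil]
        cases hh : (x :: xs).dedup with
        | nil => exact absurd hh this
        | cons a b => simp
      omega

-- the set A builds has as many elements as Mathlib's dedup of nums
theorem ofList_length_eq_dedup (nums : List Int) :
    (PySem.Set.ofList nums).length = nums.dedup.length := by
  have hperm : List.Perm (PySem.Set.ofList nums) nums.dedup := by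
    rw [List.perm_ext_iff_of_nodup (PySem.Set.nodup_ofList nums) nums.nodup_dedup]
    intro a; rw [PySem.Set.mem_ofList, List.mem_dedup]
  exact hperm.length_eq

theorem solution_spec : Claim_equal_solution := by
  intro nums _
  unfold Spec_solution solution solution_alt
  have hm : (0 : Int) ≤ PySem.Int.floordiv (nums.length : Int) 2 := by
    rw [PySem.Int.floordiv_eq_ediv_of_pos (by omega)]
    positivity
  show solutionDrain (nums.foldl PySem.Set.add PySem.Set.empty) (nums.foldl PySem.Set.add PySem.Set.empty) 0 (PySem.Int.floordiv (nums.length : Int) 2) = _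
  have hfold : nums.foldl PySem.Set.add PySem.Set.empty = PySem.Set.ofList nums := (PySem.Set.ofList_eq_foldl nums).symm
  rw [hfold, solutionDrain_eq _ _ _ _ hm]
  show _ = min (countRuns (PySem.List.sorted nums (fun x => x) false)) (PySem.Int.floordiv (nums.length : Int) 2)
  have hsorted := PySem.List.sorted_pairwise (xs := nums) (key := fun x : Int => x)
  rw [countRuns_eq _ hsorted]
  have hlen : (PySem.List.sorted nums (fun x => x) false).dedup.length = nums.dedup.length :=
    ((PySem.List.sorted_perm nums (fun x => x) false).dedup).length_eq
  rw [hlen, ofList_length_eq_dedup]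
  omega
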